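-- pv_equiv track=rewrite | github.com/winter-olaf/algorithm-study | Programmers/최준원_[2]숫자의 표현.py | solution
-- ===== SOURCE A (Python) =====
-- def solution(n):
--     result = 0
--     for x in range(1, n+1):
--         while x <= n:
--             if x == n:
--                 result += 1
--                 break
--             x += x+1
--     return result
-- ===== SOURCE B (Python) =====
-- def solution(n):
--     # closed form: count the 2-adic valuation of n+1; one extra start unless n+1 is a power of two
--     if n <= 0:
--         return 0
--     m = n + 1
--     v = 0
--     while m % 2 == 0:
--         m //= 2
--         v += 1
--     return v + 1 if m > 1 else v
-- ===== Notes on version B (the rewrite author's own statement) =====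
-- stated objective: faster
-- what changed: Replaces the O(n log n) scan of all starting values x with the closed form: the count equals the 2-adic valuation of n+1, plus 1 unless n+1 is a power of two, computed by halving n+1.
import Mathlib
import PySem

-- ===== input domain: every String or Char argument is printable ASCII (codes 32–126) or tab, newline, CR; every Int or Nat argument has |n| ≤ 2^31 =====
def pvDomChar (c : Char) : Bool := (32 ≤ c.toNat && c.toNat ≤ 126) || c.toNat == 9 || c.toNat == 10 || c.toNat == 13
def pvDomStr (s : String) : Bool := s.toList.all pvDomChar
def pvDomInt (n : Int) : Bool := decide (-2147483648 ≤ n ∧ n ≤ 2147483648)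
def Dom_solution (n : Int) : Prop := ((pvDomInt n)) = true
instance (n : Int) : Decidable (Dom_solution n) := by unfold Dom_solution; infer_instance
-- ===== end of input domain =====

-- B replaces A's scan of every start x in [1,n] with a closed form obtained by halving n+1 (objective: faster, asymptotic).

-- ===== PORT A =====
-- inner 'while x <= n' loop; fuel is only a termination device: for the starts
-- 1 ≤ x that A's outer loop produces, x at least doubles each step, so fuel
-- n.toNat+1 is never exhausted (proved in the lemmas below) — exact for x ≥ 1.
def innerA : Nat → Int → Int → Int
  | 0, _, _ => 0
  | f+1, n, x => if x ≤ n then (if x = n then 1 else innerA f n (x + (x + 1))) else 0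

def solution (n : Int) : Int :=
  (PySem.List.pyRange 1 (n + 1) 1).foldl (fun result x => result + innerA (n.toNat + 1) n x) 0

-- ===== PORT B =====
-- 'while m % 2 == 0: m //= 2; v += 1'; the '0 < m' conjunct is a pure
-- termination guard (B only calls it with m ≥ 2, where it never fires).
def halveB (m v : Int) : Int × Int :=
  if h : PySem.Int.mod m 2 = 0 ∧ 0 < m then halveB (PySem.Int.floordiv m 2) (v + 1)
  else (m, v)
termination_by m.toNat
decreasing_by
  rw [PySem.Int.floordiv_eq_ediv_of_pos (by omega)]
  rw [PySem.Int.mod_eq_emod_of_pos (by omega)] at h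
  omega

def solution_alt (n : Int) : Int :=
  if n ≤ 0 then 0
  else
    let p := halveB (n + 1) 0
    if p.1 > 1 then p.2 + 1 else p.2

-- ===== PRECONDITION & SPEC =====
def Spec_solution (n : Int) (out : Int) : Prop := out = solution_alt n
instance (n : Int) (out : Int) : Decidable (Spec_solution n out) := by unfold Spec_solution; infer_instance

-- ===== CLAIM (what is proved, stated in full; the proofs are below) =====
def Claim_equal_solution : Prop := ∀ (n : Int), Dom_solution n → Spec_solution n (solution n)

-- ===== LEMMAS AND PROOFS =====

-- x reaches n under x ↦ 2x+1  ⟺  (x+1)·2^k = n+1 for some k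
def Hit (n x : Int) : Prop := ∃ k : Nat, (x + 1) * 2 ^ k = n + 1

theorem innerA_char : ∀ (f : Nat) (n x : Int), 1 ≤ x → n + 1 < (x + 1) * 2 ^ f →
    (innerA f n x = 1 ∧ Hit n x) ∨ (innerA f n x = 0 ∧ ¬ Hit n x) := by
  intro f
  induction f with
  | zero =>
    intro n x hx hb
    simp only [pow_zero, mul_one] at hb
    right
    refine ⟨rfl, ?_⟩
    rintro ⟨k, hk⟩
    have h2 : (1:Int) ≤ 2 ^ k := one_le_pow₀ (by norm_num)
    nlinarith
  | succ f ih =>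
    intro n x hx hb
    by_cases hle : x ≤ n
    · by_cases heq : x = n
      · left
        constructor
        · simp [innerA, heq]
        · exact ⟨0, by simp [heq]⟩
      · have hlt : x < n := lt_of_le_of_ne hle heq
        have hb' : n + 1 < (x + (x + 1) + 1) * 2 ^ f := by
          have : (x + (x + 1) + 1) * 2 ^ f = (x + 1) * 2 ^ (f + 1) := by ring
          rw [this]; exact hb
        have := ih n (x + (x + 1)) (by omega) hb'
        have hiff : Hit n (x + (x + 1)) ↔ Hit n x := by
          constructor
          · rintro ⟨k, hk⟩
            exact ⟨k + 1, by rw [← hk]; ring⟩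
          · rintro ⟨k, hk⟩
            match k with
            | 0 => simp at hk; omega
            | k + 1 => exact ⟨k, by rw [← hk]; ring⟩
        rcases this with ⟨h1, h2⟩ | ⟨h1, h2⟩
        · left; exact ⟨by simp [innerA, hle, heq, h1], hiff.mp h2⟩
        · right; exact ⟨by simp [innerA, hle, heq, h1], fun h => h2 (hiff.mpr h)⟩
    · right
      refine ⟨by simp [innerA, hle], ?_⟩
      rintro ⟨k, hk⟩
      have h2 : (1:Int) ≤ 2 ^ k := one_le_pow₀ (by norm_num)
      nlinarith

theorem fuel_ok (n x : Int) (hx : 1 ≤ x) (hn : 0 ≤ n) : n + 1 < (x + 1) * 2 ^ (n.toNat + 1) := by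
  have h1 : (n.toNat : Int) < 2 ^ n.toNat := by exact_mod_cast Nat.lt_two_pow_self
  have h2 : (2:Int) ^ n.toNat ≤ 2 ^ (n.toNat + 1) := by
    have := pow_le_pow_right₀ (by norm_num : (1:Int) ≤ 2) (Nat.le_succ n.toNat)
    exact this
  have h3 : (2:Int) * 2 ^ (n.toNat + 1) ≤ (x + 1) * 2 ^ (n.toNat + 1) := by
    have hp : (0:Int) < 2 ^ (n.toNat + 1) := by positivity
    nlinarith
  have h4 : (n : Int) = n.toNat := by omega
  nlinarith [pow_pos (by norm_num : (0:Int) < 2) (n.toNat + 1)]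

theorem innerA_one (F : Nat) (n x : Int) (hx : 1 ≤ x) (hb : n + 1 < (x + 1) * 2 ^ F)
    (h : Hit n x) : innerA F n x = 1 := by
  rcases innerA_char F n x hx hb with ⟨h1, _⟩ | ⟨_, h2⟩
  · exact h1
  · exact absurd h h2

theorem innerA_zero (F : Nat) (n x : Int) (hx : 1 ≤ x) (hb : n + 1 < (x + 1) * 2 ^ F)
    (h : ¬ Hit n x) : innerA F n x = 0 := by
  rcases innerA_char F n x hx hb with ⟨_, h2⟩ | ⟨h1, _⟩
  · exact absurd h2 h
  · exact h1

theorem solution_eq_sum (n : Int) :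
    solution n = ((PySem.List.pyRange 1 (n + 1) 1).map (fun x => innerA (n.toNat + 1) n x)).sum := by
  unfold solution
  rw [PySem.List.foldl_add]
  simp

theorem halveB_unfold (m v : Int) : halveB m v =
    if PySem.Int.mod m 2 = 0 ∧ 0 < m then halveB (PySem.Int.floordiv m 2) (v + 1) else (m, v) := by
  rw [halveB]
  split_ifs with h <;> rfl

theorem halveB_shift : ∀ (M : Nat) (m v : Int), m.toNat ≤ M →
    halveB m v = ((halveB m 0).1, v + (halveB m 0).2) := by
  intro M
  induction M with
  | zero =>
    intro m v hm
    have hg : ¬ (PySem.Int.mod m 2 = 0 ∧ 0 < m) := by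
      rintro ⟨_, h2⟩; omega
    rw [halveB_unfold m v, halveB_unfold m 0, if_neg hg, if_neg hg]
    norm_num
  | succ N ih =>
    intro m v hm
    by_cases hg : PySem.Int.mod m 2 = 0 ∧ 0 < m
    · have hmod : m % 2 = 0 := by
        rw [PySem.Int.mod_eq_emod_of_pos (by omega)] at hg; exact hg.1
      have hd : PySem.Int.floordiv m 2 = m / 2 :=
        PySem.Int.floordiv_eq_ediv_of_pos (by omega)
      have hle : (m / 2).toNat ≤ N := by omega
      rw [halveB_unfold m v, halveB_unfold m 0, if_pos hg, if_pos hg, hd,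
        ih (m / 2) (v + 1) hle, ih (m / 2) (0 + 1) hle]
      norm_num
      ring
    · rw [halveB_unfold m v, halveB_unfold m 0, if_neg hg, if_neg hg]
      norm_num

theorem halveB_shift' (m v : Int) : halveB m v = ((halveB m 0).1, v + (halveB m 0).2) :=
  halveB_shift m.toNat m v le_rfl

theorem alt_pos (n : Int) (h : 1 ≤ n) : solution_alt n =
    (if (halveB (n + 1) 0).1 > 1 then (halveB (n + 1) 0).2 + 1 else (halveB (n + 1) 0).2) := by
  unfold solution_alt
  rw [if_neg (by omega)]

-- recurrence for B: solution_alt (2m+1) = solution_alt m + 1 for m ≥ 1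
theorem alt_odd (m : Int) (hm : 1 ≤ m) : solution_alt (2 * m + 1) = solution_alt m + 1 := by
  have hstep : halveB (2 * m + 1 + 1) 0 = ((halveB (m + 1) 0).1, (halveB (m + 1) 0).2 + 1) := by
    rw [halveB_unfold]
    rw [if_pos ⟨by rw [PySem.Int.mod_eq_emod_of_pos (by omega)]; omega, by omega⟩]
    have hd : PySem.Int.floordiv (2 * m + 1 + 1) 2 = m + 1 := by
      rw [PySem.Int.floordiv_eq_ediv_of_pos (by omega)]; omega
    rw [hd, halveB_shift' (m + 1) (0 + 1)]
    norm_num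
    ring
  rw [alt_pos (2 * m + 1) (by omega), alt_pos m (by omega), hstep]
  by_cases h1 : (halveB (m + 1) 0).1 > 1 <;> simp [h1]

theorem alt_even (n : Int) (h2 : 2 ≤ n) (he : n % 2 = 0) : solution_alt n = 1 := by
  unfold solution_alt
  rw [if_neg (by omega)]
  have hh : halveB (n + 1) 0 = (n + 1, 0) := by
    rw [halveB, dif_neg]
    rw [PySem.Int.mod_eq_emod_of_pos (by omega)]
    omega
  rw [hh]
  simp
  omega

-- for even n, only x = n hits n
theorem hit_even (n x : Int) (he : n % 2 = 0) (hx : x < n) : ¬ Hit n x := by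
  rintro ⟨k, hk⟩
  match k with
  | 0 => simp at hk; omega
  | k + 1 =>
    have : (2:Int) ∣ n + 1 := ⟨(x + 1) * 2 ^ k, by rw [← hk]; ring⟩
    omega

-- for n = 2m+1, m < x < n never hits, x ≤ m hits n iff it hits m
theorem hit_mid (m x : Int) (h1 : m < x) (h2 : x < 2 * m + 1) : ¬ Hit (2 * m + 1) x := by
  rintro ⟨k, hk⟩
  match k with
  | 0 => simp at hk; omega
  | k + 1 =>
    have hp : (1:Int) ≤ 2 ^ k := one_le_pow₀ (by norm_num)
    have : (x + 1) * 2 ^ (k + 1) = (x + 1) * 2 ^ k * 2 := by ring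
    nlinarith

theorem hit_half (m x : Int) (hx1 : 1 ≤ x) (hx : x ≤ m) : Hit (2 * m + 1) x ↔ Hit m x := by
  constructor
  · rintro ⟨k, hk⟩
    match k with
    | 0 => simp at hk; exact absurd hk (by omega)
    | k + 1 =>
      refine ⟨k, ?_⟩
      have : (x + 1) * 2 ^ (k + 1) = (x + 1) * 2 ^ k * 2 := by ring
      rw [this] at hk
      omega
  · rintro ⟨k, hk⟩
    exact ⟨k + 1, by rw [pow_succ, ← mul_assoc, hk]; ring⟩

theorem sol_le_zero (n : Int) (h : n ≤ 0) : solution n = 0 := by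
  unfold solution
  rw [PySem.List.pyRange_one_eq_nil (by omega)]
  rfl

theorem sum_zero_of_nohit (n : Int) (F : Nat) (hb : ∀ x, 1 ≤ x → n + 1 < (x + 1) * 2 ^ F)
    (l : List Int) (hmem : ∀ x ∈ l, 1 ≤ x ∧ ¬ Hit n x) :
    (l.map (fun x => innerA F n x)).sum = 0 := by
  apply List.sum_eq_zero
  intro y hy
  rcases List.mem_map.mp hy with ⟨x, hxl, rfl⟩
  rcases hmem x hxl with ⟨hx1, hxh⟩
  exact innerA_zero F n x hx1 (hb x hx1) hxh

theorem sol_even (n : Int) (h2 : 2 ≤ n) (he : n % 2 = 0) : solution n = 1 := by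
  rw [solution_eq_sum]
  rw [PySem.List.pyRange_one_succ_right (by omega : (1:Int) ≤ n), List.map_append, List.sum_append]
  have hz : ((PySem.List.pyRange 1 n 1).map (fun x => innerA (n.toNat + 1) n x)).sum = 0 := by
    apply sum_zero_of_nohit n _ (fun x hx => fuel_ok n x hx (by omega))
    intro x hx
    rw [PySem.List.mem_pyRange_one] at hx
    exact ⟨hx.1, hit_even n x he hx.2⟩
  rw [hz]
  simp only [List.map_cons, List.map_nil, List.sum_cons, List.sum_nil]
  rw [innerA_one (n.toNat + 1) n n (by omega) (fuel_ok n n (by omega) (by omega)) ⟨0, by simp⟩]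
  ring

theorem sol_odd (m : Int) (hm : 1 ≤ m) : solution (2 * m + 1) = solution m + 1 := by
  set n := 2 * m + 1 with hn
  rw [solution_eq_sum, solution_eq_sum]
  have hsplit : PySem.List.pyRange 1 (n + 1) 1
      = PySem.List.pyRange 1 (m + 1) 1 ++ (PySem.List.pyRange (m + 1) n 1 ++ [n]) := by
    rw [← PySem.List.pyRange_one_succ_right (by omega : (m+1:Int) ≤ n)]
    exact PySem.List.pyRange_one_append 1 (m + 1) (n + 1) (by omega) (by omega)
  rw [hsplit, List.map_append, List.sum_append, List.map_append, List.sum_append]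
  have hmid : ((PySem.List.pyRange (m + 1) n 1).map (fun x => innerA (n.toNat + 1) n x)).sum = 0 := by
    apply sum_zero_of_nohit n _ (fun x hx => fuel_ok n x hx (by omega))
    intro x hx
    rw [PySem.List.mem_pyRange_one] at hx
    exact ⟨by omega, hit_mid m x (by omega) (by omega)⟩
  have hlast : ([n].map (fun x => innerA (n.toNat + 1) n x)).sum = 1 := by
    simp only [List.map_cons, List.map_nil, List.sum_cons, List.sum_nil]
    rw [innerA_one (n.toNat + 1) n n (by omega) (fuel_ok n n (by omega) (by omega)) ⟨0, by simp⟩]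
    ring
  have hfirst : ((PySem.List.pyRange 1 (m + 1) 1).map (fun x => innerA (n.toNat + 1) n x)).sum
      = ((PySem.List.pyRange 1 (m + 1) 1).map (fun x => innerA (m.toNat + 1) m x)).sum := by
    congr 1
    apply List.map_congr_left
    intro x hx
    rw [PySem.List.mem_pyRange_one] at hx
    have hx1 : 1 ≤ x := hx.1
    have hxm : x ≤ m := by omega
    by_cases hh : Hit m x
    · rw [innerA_one _ n x hx1 (fuel_ok n x hx1 (by omega)) ((hit_half m x hx1 hxm).mpr hh),
        innerA_one _ m x hx1 (fuel_ok m x hx1 (by omega)) hh]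
    · rw [innerA_zero _ n x hx1 (fuel_ok n x hx1 (by omega)) (fun h => hh ((hit_half m x hx1 hxm).mp h)),
        innerA_zero _ m x hx1 (fuel_ok m x hx1 (by omega)) hh]
  rw [hmid, hlast, hfirst]
  ring

theorem sol_one : solution (1 : Int) = 1 := by
  rw [solution_eq_sum]
  rw [show ((1:Int) + 1) = 2 by norm_num,
    PySem.List.pyRange_one_cons (by norm_num), PySem.List.pyRange_one_eq_nil (by norm_num)]
  norm_num [innerA]

theorem alt_one : solution_alt (1 : Int) = 1 := by
  have h2 : halveB 2 0 = (1, 1) := by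
    rw [halveB_unfold]
    rw [if_pos ⟨by rw [PySem.Int.mod_eq_emod_of_pos (by norm_num)]; norm_num, by norm_num⟩]
    rw [show PySem.Int.floordiv 2 2 = 1 by
      rw [PySem.Int.floordiv_eq_ediv_of_pos (by norm_num)]; norm_num]
    rw [halveB_unfold]
    rw [if_neg (by rw [PySem.Int.mod_eq_emod_of_pos (by norm_num)]; norm_num)]
    norm_num
  rw [alt_pos 1 le_rfl, show (1:Int) + 1 = 2 by norm_num, h2]
  norm_num

theorem main_eq : ∀ (N : Nat) (n : Int), n.toNat ≤ N → solution n = solution_alt n := by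
  intro N
  induction N with
  | zero =>
    intro n hn
    have h0 : n ≤ 0 := by omega
    rw [sol_le_zero n h0]
    unfold solution_alt
    rw [if_pos h0]
  | succ N ih =>
    intro n hn
    by_cases h0 : n ≤ 0
    · rw [sol_le_zero n h0]; unfold solution_alt; rw [if_pos h0]
    · push Not at h0
      rcases Int.even_or_odd n with ⟨k, hk⟩ | ⟨k, hk⟩
      · by_cases h1 : n = 1
        · subst h1; rw [sol_one, alt_one]
        · rw [sol_even n (by omega) (by omega), alt_even n (by omega) (by omega)]
      · -- n = 2k + 1
        by_cases h1 : n = 1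
        · subst h1; rw [sol_one, alt_one]
        · have hk1 : 1 ≤ k := by omega
          have hkn : k.toNat ≤ N := by omega
          rw [hk, sol_odd k hk1, alt_odd k hk1, ih k hkn]

-- ===== VERDICT (by name: the statement is the Claim_ definition above) =====
theorem solution_spec : Claim_equal_solution := by
  intro n _
  unfold Spec_solution
  exact main_eq n.toNat n le_rfl
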